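-- pv_equiv track=rewrite | github.com/alicesilva/P1-Python-Problemas | matriz_menor.py | matriz_menor
-- ===== SOURCE A (Python) =====
-- def matriz_menor(M1,M2):
-- 	nova_M = []
-- 	for i in range(len(M1)):
-- 		for j in range(len(M2)):
-- 			if i == j:
-- 				menores = []
-- 				for k in range(len(M1[i])):
-- 					for l in range(len(M2[j])):
-- 						if k == l:
-- 							if M1[i][k] <= M2[j][l]:
-- 								menores.append(M1[i][k])
-- 							else:
-- 								menores.append(M2[j][l])
-- 				nova_M.append(menores)
--
-- 	return nova_M
-- ===== SOURCE B (Python) =====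
-- def matriz_menor(M1, M2):
--     return [[min(a, b) for a, b in zip(r1, r2)] for r1, r2 in zip(M1, M2)]
-- ===== Notes on version B (the rewrite author's own statement) =====
-- stated objective: faster
-- what changed: Replaces the four nested index loops with i==j/k==l filtering by a direct zip of rows and elements taking min pairwise.
import Mathlib
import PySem

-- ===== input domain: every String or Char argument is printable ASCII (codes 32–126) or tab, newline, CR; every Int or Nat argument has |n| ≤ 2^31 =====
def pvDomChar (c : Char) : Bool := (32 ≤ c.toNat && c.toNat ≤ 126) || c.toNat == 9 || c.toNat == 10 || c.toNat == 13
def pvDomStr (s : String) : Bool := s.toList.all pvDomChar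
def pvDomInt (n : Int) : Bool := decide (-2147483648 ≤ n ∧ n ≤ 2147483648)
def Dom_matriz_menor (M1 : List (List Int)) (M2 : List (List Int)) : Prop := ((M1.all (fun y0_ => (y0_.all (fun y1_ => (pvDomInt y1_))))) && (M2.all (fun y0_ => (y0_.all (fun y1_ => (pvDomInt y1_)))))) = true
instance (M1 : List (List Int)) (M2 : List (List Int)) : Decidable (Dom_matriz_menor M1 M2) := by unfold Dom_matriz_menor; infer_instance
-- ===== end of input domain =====

-- B replaces A's four nested index loops with i==j/k==l filtering by a direct pairwise zip/min; a timing run measures the speed-up.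


-- ===== PORT A =====
def matriz_menor (M1 : List (List Int)) (M2 : List (List Int)) : List (List Int) :=
  (PySem.List.pyRange 0 (M1.length : Int)).foldl (fun nova_M i =>
    (PySem.List.pyRange 0 (M2.length : Int)).foldl (fun nova_M j =>
      if i = j then
        let menores :=
          (PySem.List.pyRange 0 ((PySem.List.pyGetD M1 i []).length : Int)).foldl (fun menores k =>
            (PySem.List.pyRange 0 ((PySem.List.pyGetD M2 j []).length : Int)).foldl (fun menores l =>
              if k = l then
                if PySem.List.pyGetD (PySem.List.pyGetD M1 i []) k 0 ≤ PySem.List.pyGetD (PySem.List.pyGetD M2 j []) l 0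
                then menores ++ [PySem.List.pyGetD (PySem.List.pyGetD M1 i []) k 0]
                else menores ++ [PySem.List.pyGetD (PySem.List.pyGetD M2 j []) l 0]
              else menores) menores) []
        nova_M ++ [menores]
      else nova_M) nova_M) []

-- ===== PORT B =====
def matriz_menor_alt (M1 : List (List Int)) (M2 : List (List Int)) : List (List Int) :=
  List.zipWith (fun r1 r2 => List.zipWith (fun a b => min a b) r1 r2) M1 M2

-- ===== PRECONDITION & SPEC =====
def Spec_matriz_menor (M1 : List (List Int)) (M2 : List (List Int)) (out : List (List Int)) : Prop := out = matriz_menor_alt M1 M2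
instance (M1 : List (List Int)) (M2 : List (List Int)) (out : List (List Int)) : Decidable (Spec_matriz_menor M1 M2 out) := by unfold Spec_matriz_menor; infer_instance

-- ===== CLAIM (what is proved, stated in full; the proofs are below) =====
def Claim_equal_matriz_menor : Prop := ∀ (M1 : List (List Int)) (M2 : List (List Int)), Dom_matriz_menor M1 M2 → Spec_matriz_menor M1 M2 (matriz_menor M1 M2)

-- ===== LEMMAS AND PROOFS =====

/-- A fold whose body fires only at `j = i` applies `g i` once iff `i` is in the (nodup) list. -/
lemma foldl_ite_eq_mem {α : Type} (g : Int → α → α) (i : Int) :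
    ∀ (L : List Int), L.Nodup → ∀ acc,
      L.foldl (fun a j => if i = j then g j a else a) acc = if i ∈ L then g i acc else acc := by
  intro L
  induction L with
  | nil => intro _ acc; simp
  | cons x t ih =>
    intro hnd acc
    by_cases h : i = x
    · subst h
      have hit : i ∉ t := (List.nodup_cons.mp hnd).1
      simp [List.foldl_cons, ih (List.nodup_cons.mp hnd).2, hit]
    · simp [List.foldl_cons, h, ih (List.nodup_cons.mp hnd).2]

lemma filter_range_lt (n m : Nat) :
    (List.range n).filter (fun k => decide (k < m)) = List.range (min n m) := by
  induction n with
  | zero => simp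
  | succ n ih =>
    rw [List.range_succ, List.filter_append, ih]
    by_cases h : n < m
    · have h2 : min n m = n := by omega
      simp [h, h2, ← List.range_succ]
    · have h1 : min (n + 1) m = min n m := by omega
      simp [h, h1]

/-- The shared loop shape of both levels of A: a double index loop over two lists,
    filtered by index equality, appending `f xs[i] ys[i]`, is `zipWith f`. -/
lemma pyfold_zip {α β : Type} (f : α → α → β) (d : α) (xs ys : List α) :
    (PySem.List.pyRange 0 (xs.length : Int)).foldl (fun acc i =>
      (PySem.List.pyRange 0 (ys.length : Int)).foldl (fun acc j =>
        if i = j then acc ++ [f (PySem.List.pyGetD xs i d) (PySem.List.pyGetD ys j d)] else acc) acc) []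
    = List.zipWith f xs ys := by
  have step1 :
      (PySem.List.pyRange 0 (xs.length : Int)).foldl (fun acc i =>
        (PySem.List.pyRange 0 (ys.length : Int)).foldl (fun acc j =>
          if i = j then acc ++ [f (PySem.List.pyGetD xs i d) (PySem.List.pyGetD ys j d)] else acc) acc) []
      = (PySem.List.pyRange 0 (xs.length : Int)).foldl (fun acc i =>
          if i ∈ PySem.List.pyRange 0 (ys.length : Int)
          then acc ++ [f (PySem.List.pyGetD xs i d) (PySem.List.pyGetD ys i d)] else acc) [] := by
    congr 1
    funext acc i
    exact foldl_ite_eq_mem (fun j a => a ++ [f (PySem.List.pyGetD xs i d) (PySem.List.pyGetD ys j d)]) i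
      _ (PySem.List.nodup_pyRange_one 0 _) acc
  rw [step1, PySem.List.pyRange_zero_nat xs.length, List.foldl_map]
  have step2 :
      (List.range xs.length).foldl (fun (acc : List β) (k : Nat) =>
        if ((k : Int)) ∈ PySem.List.pyRange 0 (ys.length : Int)
        then acc ++ [f (PySem.List.pyGetD xs ((k : Nat) : Int) d) (PySem.List.pyGetD ys ((k : Nat) : Int) d)] else acc) []
      = (List.range xs.length).foldl (fun acc k =>
          if (fun k => decide (k < ys.length)) k = true
          then acc ++ [(fun k => f (xs.getD k d) (ys.getD k d)) k] else acc) [] := by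
    congr 1
    funext acc k
    by_cases h : k < ys.length
    · have : (k : Int) ∈ PySem.List.pyRange 0 (ys.length : Int) := by
        rw [PySem.List.mem_pyRange_one]; exact ⟨Int.natCast_nonneg k, by exact_mod_cast h⟩
      simp [this, h, PySem.List.pyGetD_natCast]
    · have : (k : Int) ∉ PySem.List.pyRange 0 (ys.length : Int) := by
        rw [PySem.List.mem_pyRange_one]; push Not; intro _; exact_mod_cast Nat.le_of_not_lt h
      simp [this, h]
  rw [step2, PySem.List.foldl_append_if, filter_range_lt, List.nil_append]
  apply List.ext_getElem
  · simp
  · intro k hk1 hk2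
    have hx : k < xs.length := by simp at hk1; omega
    have hy : k < ys.length := by simp at hk1; omega
    simp [List.getD_eq_getElem?_getD, hx, hy]

-- ===== VERDICT (by name: the statement is the Claim_ definition above) =====
theorem matriz_menor_spec : Claim_equal_matriz_menor := by
  intro M1 M2 _
  show matriz_menor M1 M2 = matriz_menor_alt M1 M2
  unfold matriz_menor matriz_menor_alt
  have inner : ∀ r1 r2 : List Int,
      (PySem.List.pyRange 0 (r1.length : Int)).foldl (fun menores k =>
        (PySem.List.pyRange 0 (r2.length : Int)).foldl (fun menores l =>
          if k = l then
            if PySem.List.pyGetD r1 k 0 ≤ PySem.List.pyGetD r2 l 0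
            then menores ++ [PySem.List.pyGetD r1 k 0]
            else menores ++ [PySem.List.pyGetD r2 l 0]
          else menores) menores) []
      = List.zipWith (fun a b => min a b) r1 r2 := by
    intro r1 r2
    have := pyfold_zip (fun a b => if a ≤ b then a else b) (0 : Int) r1 r2
    simp only [min_def]
    rw [← this]
    congr 1
    funext acc k
    congr 1
    funext acc l
    by_cases h : k = l
    · simp [h, apply_ite (fun t => acc ++ [t])]
    · simp [h]
  calc (PySem.List.pyRange 0 (M1.length : Int)).foldl (fun nova_M i =>
        (PySem.List.pyRange 0 (M2.length : Int)).foldl (fun nova_M j =>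
          if i = j then
            nova_M ++ [(PySem.List.pyRange 0 ((PySem.List.pyGetD M1 i []).length : Int)).foldl (fun menores k =>
              (PySem.List.pyRange 0 ((PySem.List.pyGetD M2 j []).length : Int)).foldl (fun menores l =>
                if k = l then
                  if PySem.List.pyGetD (PySem.List.pyGetD M1 i []) k 0 ≤ PySem.List.pyGetD (PySem.List.pyGetD M2 j []) l 0
                  then menores ++ [PySem.List.pyGetD (PySem.List.pyGetD M1 i []) k 0]
                  else menores ++ [PySem.List.pyGetD (PySem.List.pyGetD M2 j []) l 0]
                else menores) menores) []]
          else nova_M) nova_M) []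
      = (PySem.List.pyRange 0 (M1.length : Int)).foldl (fun nova_M i =>
        (PySem.List.pyRange 0 (M2.length : Int)).foldl (fun nova_M j =>
          if i = j then
            nova_M ++ [List.zipWith (fun a b => min a b) (PySem.List.pyGetD M1 i []) (PySem.List.pyGetD M2 j [])]
          else nova_M) nova_M) [] := by
        congr 1; funext nova_M i; congr 1; funext nova_M j
        rw [inner (PySem.List.pyGetD M1 i []) (PySem.List.pyGetD M2 j [])]
    _ = List.zipWith (fun r1 r2 => List.zipWith (fun a b => min a b) r1 r2) M1 M2 :=
        pyfold_zip (fun r1 r2 => List.zipWith (fun a b => min a b) r1 r2) [] M1 M2
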